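-- pv_equiv track=rewrite | github.com/sudocentral/paypal-mailwizz | tools/import_paypal_csv.py | smart_title
-- ===== SOURCE A (Python) =====
-- def smart_title(s: str) -> str:
--     """Normalize capitalization: always Title Case each token, preserving apostrophes/hyphens."""
--     if not s:
--         return s
--     parts = s.split(" ")
--     out = []
--     for p in parts:
--         # Handle apostrophes and hyphens
--         sub = [seg.capitalize() for seg in p.split("-")]
--         sub = ["'".join([r.capitalize() for r in seg.split("'")]) for seg in sub]
--         out.append("-".join(sub))
--     return " ".join(out)
-- ===== SOURCE B (Python) =====
-- def smart_title(s: str) -> str: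
--     out = []
--     start = True
--     for ch in s:
--         if ch in " -'":
--             out.append(ch)
--             start = True
--         elif start:
--             out.append(ch.upper())
--             start = False
--         else:
--             out.append(ch.lower())
--             start = False
--     return "".join(out)
-- ===== Notes on version B (the rewrite author's own statement) =====
-- stated objective: alternative
-- what changed: Replaced the three nested split/capitalize/join passes (on spaces, hyphens, apostrophes) by a single left-to-right character scan with a word-start flag that uppercases the first character after any delimiter and lowercases the rest.
import Mathlib
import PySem

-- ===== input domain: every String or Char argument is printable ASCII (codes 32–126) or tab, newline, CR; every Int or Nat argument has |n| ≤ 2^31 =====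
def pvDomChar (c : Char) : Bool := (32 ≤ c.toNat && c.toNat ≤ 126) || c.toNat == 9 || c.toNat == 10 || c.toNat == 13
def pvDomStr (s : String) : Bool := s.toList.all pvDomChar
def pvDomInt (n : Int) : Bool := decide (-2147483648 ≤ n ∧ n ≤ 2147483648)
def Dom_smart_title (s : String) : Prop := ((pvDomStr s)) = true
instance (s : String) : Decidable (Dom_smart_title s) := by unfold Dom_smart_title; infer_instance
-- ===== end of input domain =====

-- B replaces A's three nested split/capitalize/join passes by one left-to-right scan with a
-- word-start flag (objective: alternative single-pass decomposition, same result).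

-- ===== PORT A =====
-- str.capitalize: first char uppercased, the rest lowercased (exact on the ASCII domain)
def pvCap (cs : List Char) : List Char :=
  match cs with
  | [] => []
  | c :: rest => PySem.Chars.upperChar c :: PySem.Chars.lower rest

def smart_title (s : String) : String :=
  if s.toList = [] then s
  else
    let parts := PySem.Chars.splitOn s.toList [' ']
    let out := parts.foldl (fun out p =>
      let sub := (PySem.Chars.splitOn p ['-']).map pvCap
      let sub2 := sub.map (fun seg =>
        PySem.Chars.join ['\''] ((PySem.Chars.splitOn seg ['\'']).map pvCap))
      out ++ [PySem.Chars.join ['-'] sub2]) []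
    String.mk (PySem.Chars.join [' '] out)

-- ===== PORT B =====
-- single pass: delimiter resets the start flag, any other char is upper/lowered by it
def pvScanB : Bool → List Char → List Char
  | _, [] => []
  | start, c :: cs =>
    if c ∈ [' ', '-', '\''] then c :: pvScanB true cs
    else if start then PySem.Chars.upperChar c :: pvScanB false cs
    else PySem.Chars.lowerChar c :: pvScanB false cs

def smart_title_alt (s : String) : String := String.mk (pvScanB true s.toList)

-- ===== PRECONDITION & SPEC =====
def Spec_smart_title (s : String) (out : String) : Prop := out = smart_title_alt s
instance (s : String) (out : String) : Decidable (Spec_smart_title s out) := by unfold Spec_smart_title; infer_instance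

-- ===== CLAIM (what is proved, stated in full; the proofs are below) =====
def Claim_equal_smart_title : Prop := ∀ (s : String), Dom_smart_title s → Spec_smart_title s (smart_title s)

-- ===== LEMMAS AND PROOFS =====

-- structural single-char split / join / generic scan used to relate the two ports
def pvSplit (d : Char) : List Char → List (List Char)
  | [] => [[]]
  | c :: cs => if c = d then [] :: pvSplit d cs else (pvSplit d cs).modifyHead (c :: ·)

def pvJoin (d : Char) : List (List Char) → List Char
  | [] => []
  | [p] => p
  | p :: q :: ps => p ++ d :: pvJoin d (q :: ps)

def pvScan (D : List Char) : Bool → List Char → List Char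
  | _, [] => []
  | st, c :: cs =>
    if c ∈ D then c :: pvScan D true cs
    else (if st then PySem.Chars.upperChar c else PySem.Chars.lowerChar c) :: pvScan D false cs

theorem pvSplit_ne_nil (d : Char) : ∀ l, pvSplit d l ≠ []
  | [] => by simp [pvSplit]
  | c :: cs => by
    simp only [pvSplit]
    split
    · simp
    · cases h : pvSplit d cs with
      | nil => exact absurd h (pvSplit_ne_nil d cs)
      | cons p ps => simp [h]

theorem pv_go_spec (d : Char) (fuel : Nat) :
    ∀ (l cur : List Char) (acc : List (List Char)), l.length ≤ fuel →
      PySem.Chars.splitOn.go [d] fuel l cur acc =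
        acc.reverse ++ (pvSplit d l).modifyHead (cur.reverse ++ ·) := by
  induction fuel with
  | zero =>
    intro l cur acc hl
    have hnil : l = [] := by cases l <;> simp_all
    subst hnil
    simp only [PySem.Chars.splitOn.go, pvSplit]
    simp
  | succ n ih =>
    intro l cur acc hl
    cases l with
    | nil =>
      simp only [PySem.Chars.splitOn.go, pvSplit]
      simp
    | cons c rest =>
      simp only [PySem.Chars.splitOn.go]
      by_cases hc : c = d
      · subst hc
        have hpre : [c].isPrefixOf (c :: rest) = true := by simp [List.isPrefixOf]
        rw [if_pos hpre]
        rw [ih _ _ _ (by simpa using Nat.le_of_succ_le_succ hl)]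
        simp [pvSplit]
        cases pvSplit c rest <;> simp
      · have hpre : [d].isPrefixOf (c :: rest) = false := by
          simp [List.isPrefixOf]
          exact fun h => absurd h.symm hc
        rw [if_neg (by simp [hpre])]
        rw [ih _ _ _ (by simpa using Nat.le_of_succ_le_succ hl)]
        cases h : pvSplit d rest with
        | nil => exact absurd h (pvSplit_ne_nil d rest)
        | cons p ps =>
          simp [pvSplit, hc, h, List.append_assoc]

theorem pv_splitOn_eq (d : Char) (l : List Char) :
    PySem.Chars.splitOn l [d] = pvSplit d l := by
  unfold PySem.Chars.splitOn
  rw [pv_go_spec d (l.length + 1) l [] [] (by omega)]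
  cases h : pvSplit d l with
  | nil => exact absurd h (pvSplit_ne_nil d l)
  | cons p ps => simp

theorem pv_join_eq (d : Char) (L : List (List Char)) :
    PySem.Chars.join [d] L = pvJoin d L := by
  unfold PySem.Chars.join
  induction L with
  | nil => simp [pvJoin, List.intercalate]
  | cons p ps ih =>
    cases ps with
    | nil => simp [pvJoin, List.intercalate]
    | cons q qs =>
      simp only [pvJoin]
      rw [← ih]
      simp [List.intercalate, List.intersperse]

theorem pv_scan_nil_false (cs : List Char) : pvScan [] false cs = PySem.Chars.lower cs := by
  induction cs with
  | nil => simp [pvScan, PySem.Chars.lower]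
  | cons c cs ih => simp [pvScan, PySem.Chars.lower, ih]

theorem pv_cap_eq (cs : List Char) : pvCap cs = pvScan [] true cs := by
  cases cs with
  | nil => rfl
  | cons c rest => simp [pvCap, pvScan, pv_scan_nil_false]

theorem pv_join_cons (d : Char) (x : List Char) (xs : List (List Char)) :
    pvJoin d (x :: xs) = x ++ xs.flatMap (fun q => d :: q) := by
  induction xs generalizing x with
  | nil => simp [pvJoin]
  | cons y ys ih => simp only [pvJoin, ih y, List.flatMap_cons]; simp

theorem pv_lift (d : Char) (D : List Char) (hd : d ∉ D) :
    ∀ (l : List Char) (st : Bool) (p : List Char) (ps : List (List Char)),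
      pvSplit d l = p :: ps →
      pvScan D st p ++ ps.flatMap (fun q => d :: pvScan D true q) = pvScan (d :: D) st l := by
  intro l
  induction l with
  | nil =>
    intro st p ps h
    simp only [pvSplit] at h
    cases h
    simp [pvScan]
  | cons c cs ih =>
    intro st p ps h
    by_cases hc : c = d
    · subst hc
      simp only [pvSplit, if_pos rfl] at h
      cases h
      cases hrec : pvSplit c cs with
      | nil => exact absurd hrec (pvSplit_ne_nil c cs)
      | cons p' ps' =>
        simp only [pvScan, List.mem_cons, List.flatMap_cons]
        simp only [List.nil_append]
        rw [← ih true p' ps' hrec]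
        simp [pvScan]
    · simp only [pvSplit, if_neg hc] at h
      cases hrec : pvSplit d cs with
      | nil => exact absurd hrec (pvSplit_ne_nil d cs)
      | cons p' ps' =>
        rw [hrec] at h
        simp only [List.modifyHead_cons] at h
        injection h with h1 h2
        subst h1; subst h2
        by_cases hD : c ∈ D
        · have h1 : pvScan D st (c :: p') = c :: pvScan D true p' := by simp [pvScan, hD]
          have h2 : pvScan (d :: D) st (c :: cs) = c :: pvScan (d :: D) true cs := by
            simp [pvScan, hD]
          rw [h1, h2, List.cons_append, ← ih true p' ps' hrec]
        · have h1 : pvScan D st (c :: p') =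
              (if st then PySem.Chars.upperChar c else PySem.Chars.lowerChar c) :: pvScan D false p' := by
            simp [pvScan, hD]
          have h2 : pvScan (d :: D) st (c :: cs) =
              (if st then PySem.Chars.upperChar c else PySem.Chars.lowerChar c) :: pvScan (d :: D) false cs := by
            simp [pvScan, hD, hc]
          rw [h1, h2, List.cons_append, ← ih false p' ps' hrec]

theorem pv_liftJoin (d : Char) (D : List Char) (hd : d ∉ D) (l : List Char) :
    pvJoin d ((pvSplit d l).map (pvScan D true)) = pvScan (d :: D) true l := by
  cases h : pvSplit d l with
  | nil => exact absurd h (pvSplit_ne_nil d l)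
  | cons p ps =>
    rw [List.map_cons, pv_join_cons, List.flatMap_map]
    exact pv_lift d D hd l true p ps h


-- arithmetic characterisation of PySem's ASCII case primitives
theorem pv_isupper_iff (c : Char) : PySem.Chars.isupper c = true ↔ 65 ≤ c.toNat ∧ c.toNat ≤ 90 := by
  simp only [PySem.Chars.isupper, Bool.and_eq_true, decide_eq_true_eq, Char.le_def,
    UInt32.le_iff_toNat_le]
  exact Iff.rfl

theorem pv_islower_iff (c : Char) : PySem.Chars.islower c = true ↔ 97 ≤ c.toNat ∧ c.toNat ≤ 122 := by
  simp only [PySem.Chars.islower, Bool.and_eq_true, decide_eq_true_eq, Char.le_def,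
    UInt32.le_iff_toNat_le]
  exact Iff.rfl

theorem pv_toNat_upperChar (c : Char) :
    (PySem.Chars.upperChar c).toNat = if PySem.Chars.islower c then c.toNat - 32 else c.toNat := by
  unfold PySem.Chars.upperChar
  split
  · next h =>
    have h' := (pv_islower_iff c).mp h
    have hv : Nat.isValidChar (c.toNat - 32) := Or.inl (by omega)
    simp only [Char.ofNat, Char.ofNatAux, hv, dif_pos]
    rfl
  · rfl

theorem pv_toNat_lowerChar (c : Char) :
    (PySem.Chars.lowerChar c).toNat = if PySem.Chars.isupper c then c.toNat + 32 else c.toNat := by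
  unfold PySem.Chars.lowerChar
  split
  · next h =>
    have h' := (pv_isupper_iff c).mp h
    have hv : Nat.isValidChar (c.toNat + 32) := Or.inl (by omega)
    simp only [Char.ofNat, Char.ofNatAux, hv, dif_pos]
    rfl
  · rfl

theorem pv_toNat_inj (c d : Char) (h : c.toNat = d.toNat) : c = d :=
  Char.ext (UInt32.toNat_inj.mp h)

theorem pv_UL (c : Char) :
    PySem.Chars.upperChar (PySem.Chars.lowerChar c) = PySem.Chars.upperChar c := by
  apply pv_toNat_inj
  by_cases hu : PySem.Chars.isupper c = true
  · have hb := (pv_isupper_iff c).mp hu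
    have hLn : (PySem.Chars.lowerChar c).toNat = c.toNat + 32 := by
      rw [pv_toNat_lowerChar, if_pos hu]
    have hLl : PySem.Chars.islower (PySem.Chars.lowerChar c) = true :=
      (pv_islower_iff _).mpr (by omega)
    have hcl : ¬ PySem.Chars.islower c = true := fun h => by
      have := (pv_islower_iff c).mp h; omega
    rw [pv_toNat_upperChar, pv_toNat_upperChar, if_pos hLl, if_neg hcl, hLn]
    omega
  · have hLn : (PySem.Chars.lowerChar c).toNat = c.toNat := by
      rw [pv_toNat_lowerChar, if_neg hu]
    by_cases hl : PySem.Chars.islower c = true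
    · have hb := (pv_islower_iff c).mp hl
      have hLl : PySem.Chars.islower (PySem.Chars.lowerChar c) = true :=
        (pv_islower_iff _).mpr (by omega)
      rw [pv_toNat_upperChar, pv_toNat_upperChar, if_pos hLl, if_pos hl, hLn]
    · have hLl : ¬ PySem.Chars.islower (PySem.Chars.lowerChar c) = true := fun h => by
        have := (pv_islower_iff _).mp h
        exact hl ((pv_islower_iff c).mpr (by omega))
      rw [pv_toNat_upperChar, pv_toNat_upperChar, if_neg hLl, if_neg hl, hLn]

theorem pv_LU (c : Char) :
    PySem.Chars.lowerChar (PySem.Chars.upperChar c) = PySem.Chars.lowerChar c := by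
  apply pv_toNat_inj
  by_cases hl : PySem.Chars.islower c = true
  · have hb := (pv_islower_iff c).mp hl
    have hUn : (PySem.Chars.upperChar c).toNat = c.toNat - 32 := by
      rw [pv_toNat_upperChar, if_pos hl]
    have hUu : PySem.Chars.isupper (PySem.Chars.upperChar c) = true :=
      (pv_isupper_iff _).mpr (by omega)
    have hcu : ¬ PySem.Chars.isupper c = true := fun h => by
      have := (pv_isupper_iff c).mp h; omega
    rw [pv_toNat_lowerChar, pv_toNat_lowerChar, if_pos hUu, if_neg hcu, hUn]
    omega
  · have hUn : (PySem.Chars.upperChar c).toNat = c.toNat := by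
      rw [pv_toNat_upperChar, if_neg hl]
    by_cases hu : PySem.Chars.isupper c = true
    · have hb := (pv_isupper_iff c).mp hu
      have hUu : PySem.Chars.isupper (PySem.Chars.upperChar c) = true :=
        (pv_isupper_iff _).mpr (by omega)
      rw [pv_toNat_lowerChar, pv_toNat_lowerChar, if_pos hUu, if_pos hu, hUn]
    · have hUu : ¬ PySem.Chars.isupper (PySem.Chars.upperChar c) = true := fun h => by
        have := (pv_isupper_iff _).mp h
        exact hu ((pv_isupper_iff c).mpr (by omega))
      rw [pv_toNat_lowerChar, pv_toNat_lowerChar, if_neg hUu, if_neg hu, hUn]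

theorem pv_UU (c : Char) :
    PySem.Chars.upperChar (PySem.Chars.upperChar c) = PySem.Chars.upperChar c := by
  apply pv_toNat_inj
  by_cases hl : PySem.Chars.islower c = true
  · have hb := (pv_islower_iff c).mp hl
    have hUn : (PySem.Chars.upperChar c).toNat = c.toNat - 32 := by
      rw [pv_toNat_upperChar, if_pos hl]
    have hUl : ¬ PySem.Chars.islower (PySem.Chars.upperChar c) = true := fun h => by
      have := (pv_islower_iff _).mp h; omega
    rw [pv_toNat_upperChar, if_neg hUl, hUn]
  · have hUn : (PySem.Chars.upperChar c).toNat = c.toNat := by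
      rw [pv_toNat_upperChar, if_neg hl]
    have hUl : ¬ PySem.Chars.islower (PySem.Chars.upperChar c) = true := fun h => by
      have := (pv_islower_iff _).mp h
      exact hl ((pv_islower_iff c).mpr (by omega))
    rw [pv_toNat_upperChar, if_neg hUl, hUn]

theorem pv_LL (c : Char) :
    PySem.Chars.lowerChar (PySem.Chars.lowerChar c) = PySem.Chars.lowerChar c := by
  apply pv_toNat_inj
  by_cases hu : PySem.Chars.isupper c = true
  · have hb := (pv_isupper_iff c).mp hu
    have hLn : (PySem.Chars.lowerChar c).toNat = c.toNat + 32 := by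
      rw [pv_toNat_lowerChar, if_pos hu]
    have hLu : ¬ PySem.Chars.isupper (PySem.Chars.lowerChar c) = true := fun h => by
      have := (pv_isupper_iff _).mp h; omega
    rw [pv_toNat_lowerChar, if_neg hLu, hLn]
  · have hLn : (PySem.Chars.lowerChar c).toNat = c.toNat := by
      rw [pv_toNat_lowerChar, if_neg hu]
    have hLu : ¬ PySem.Chars.isupper (PySem.Chars.lowerChar c) = true := fun h => by
      have := (pv_isupper_iff _).mp h
      exact hu ((pv_isupper_iff c).mpr (by omega))
    rw [pv_toNat_lowerChar, if_neg hLu, hLn]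

theorem pv_upperChar_ne (c : Char) (h : c ≠ '\'') : PySem.Chars.upperChar c ≠ '\'' := by
  intro he
  have hn := congrArg Char.toNat he
  rw [pv_toNat_upperChar] at hn
  by_cases hl : PySem.Chars.islower c = true
  · have := (pv_islower_iff c).mp hl
    rw [if_pos hl] at hn
    have h39 : ('\'' : Char).toNat = 39 := rfl
    rw [h39] at hn
    omega
  · rw [if_neg hl] at hn
    exact h (pv_toNat_inj _ _ hn)

theorem pv_lowerChar_ne (c : Char) (h : c ≠ '\'') : PySem.Chars.lowerChar c ≠ '\'' := by
  intro he
  have hn := congrArg Char.toNat he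
  rw [pv_toNat_lowerChar] at hn
  by_cases hu : PySem.Chars.isupper c = true
  · have := (pv_isupper_iff c).mp hu
    rw [if_pos hu] at hn
    have h39 : ('\'' : Char).toNat = 39 := rfl
    rw [h39] at hn
    omega
  · rw [if_neg hu] at hn
    exact h (pv_toNat_inj _ _ hn)

theorem pv_idem (x : List Char) :
    ∀ (st1 st2 : Bool), pvScan ['\''] st2 (pvScan [] st1 x) = pvScan ['\''] st2 x := by
  induction x with
  | nil => intro st1 st2; rfl
  | cons c cs ih =>
    intro st1 st2
    have hinner : pvScan [] st1 (c :: cs) =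
        (if st1 then PySem.Chars.upperChar c else PySem.Chars.lowerChar c) :: pvScan [] false cs := by
      simp [pvScan]
    rw [hinner]
    by_cases hc : c = '\''
    · subst hc
      have hhd : (if st1 then PySem.Chars.upperChar '\'' else PySem.Chars.lowerChar '\'') = '\'' := by
        cases st1 <;> decide
      rw [hhd]
      have hstep : pvScan ['\''] st2 ('\'' :: pvScan [] false cs) =
          '\'' :: pvScan ['\''] true (pvScan [] false cs) := by simp [pvScan]
      rw [hstep, ih false true]
      simp [pvScan]
    · have hhd : (if st1 then PySem.Chars.upperChar c else PySem.Chars.lowerChar c) ∉ ['\''] := by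
        cases st1
        · simp only [List.mem_singleton, Bool.false_eq_true, if_false]
          exact pv_lowerChar_ne c hc
        · simp only [List.mem_singleton, if_true]
          exact pv_upperChar_ne c hc
      have hcm : c ∉ ['\''] := by simp [hc]
      simp only [pvScan, if_neg hhd, if_neg hcm]
      rw [ih false false]
      congr 1
      cases st1 <;> cases st2 <;> simp [pv_UU, pv_UL, pv_LU, pv_LL]

theorem pv_scanB_eq (cs : List Char) : ∀ st, pvScanB st cs = pvScan [' ', '-', '\''] st cs := by
  induction cs with
  | nil => intro st; rfl
  | cons c cs ih =>
    intro st
    simp only [pvScanB, pvScan, ih]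
    cases st <;> split <;> simp

theorem pv_main (cs : List Char) :
    PySem.Chars.join [' ']
      ((PySem.Chars.splitOn cs [' ']).foldl (fun out p =>
        out ++ [PySem.Chars.join ['-']
          (((PySem.Chars.splitOn p ['-']).map pvCap).map (fun seg =>
            PySem.Chars.join ['\''] ((PySem.Chars.splitOn seg ['\'']).map pvCap)))]) []) =
    pvScanB true cs := by
  have inner_eq : ∀ y : List Char,
      PySem.Chars.join ['\''] ((PySem.Chars.splitOn (pvCap y) ['\'']).map pvCap) =
        pvScan ['\''] true y := by
    intro y
    rw [pv_splitOn_eq, pv_join_eq]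
    have hmap : (pvSplit '\'' (pvCap y)).map pvCap = (pvSplit '\'' (pvCap y)).map (pvScan [] true) :=
      List.map_congr_left (fun a _ => pv_cap_eq a)
    rw [hmap, pv_liftJoin '\'' [] (by simp) (pvCap y), pv_cap_eq, pv_idem y true true]
  have hyph_eq : ∀ p : List Char,
      PySem.Chars.join ['-']
        (((PySem.Chars.splitOn p ['-']).map pvCap).map (fun seg =>
          PySem.Chars.join ['\''] ((PySem.Chars.splitOn seg ['\'']).map pvCap))) =
        pvScan ['-', '\''] true p := by
    intro p
    rw [pv_splitOn_eq, pv_join_eq, List.map_map]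
    have hmap : (pvSplit '-' p).map ((fun seg =>
          PySem.Chars.join ['\''] ((PySem.Chars.splitOn seg ['\'']).map pvCap)) ∘ pvCap) =
        (pvSplit '-' p).map (pvScan ['\''] true) :=
      List.map_congr_left (fun a _ => inner_eq a)
    rw [hmap, ← pv_join_eq, pv_join_eq, pv_liftJoin '-' ['\''] (by decide) p]
  have hfold : ∀ (L : List (List Char)) (f : List Char → List Char) (init : List (List Char)),
      L.foldl (fun out p => out ++ [f p]) init = init ++ L.map f := by
    intro L
    induction L with
    | nil => intro f init; simp
    | cons p ps ihl => intro f init; simp [List.foldl_cons, ihl]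
  rw [pv_splitOn_eq, hfold, List.nil_append, pv_join_eq]
  have hmap : (pvSplit ' ' cs).map (fun p =>
        PySem.Chars.join ['-']
          (((PySem.Chars.splitOn p ['-']).map pvCap).map (fun seg =>
            PySem.Chars.join ['\''] ((PySem.Chars.splitOn seg ['\'']).map pvCap)))) =
      (pvSplit ' ' cs).map (pvScan ['-', '\''] true) :=
    List.map_congr_left (fun a _ => hyph_eq a)
  rw [hmap, pv_liftJoin ' ' ['-', '\''] (by decide) cs, pv_scanB_eq]

-- ===== VERDICT (by name: the statement is the Claim_ definition above) =====
theorem smart_title_spec : Claim_equal_smart_title := by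
  intro s _
  unfold Spec_smart_title smart_title smart_title_alt
  by_cases h : s.toList = []
  · simp only [h, if_pos rfl]
    have : s = "" := String.toList_eq_nil_iff.mp h
    subst this
    rfl
  · simp only [h, if_neg h]
    exact congrArg String.mk (pv_main s.toList)
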